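-- pv_equiv track=rewrite | github.com/jeffomidvaran/TheBlockouts | code/construct_enclosure.py | spawn_multiple_enemies
-- ===== SOURCE A (Python) =====
-- from builtins import range
--
-- def spawn_multiple_enemies(ememy_list):
--   result_string = ""
--   for e in ememy_list:
--     for _ in range(e[1]):
--       if(e[0] == "Creeper"):
--         result_string +=  '''<DrawEntity x="10" y="227" z="10" type="{}" yaw="0" xVel="{}" yVel="{}" zVel="{}"/>'''.format(e[0],1,1,1)
--       else:
--         result_string +=  '''<DrawEntity x="10" y="227" z="10" type="{}" yaw="0" />'''.format(e[0])
--
--   return result_string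
-- ===== SOURCE B (Python) =====
-- def spawn_multiple_enemies(ememy_list):
--   # Repetition by binary doubling (exponentiation-by-squaring on strings):
--   # O(log n) concatenations per enemy instead of n accumulation steps.
--   def repeat(piece, n):
--     out = ""
--     while n > 0:
--       if n & 1:
--         out += piece
--       piece += piece
--       n >>= 1
--     return out
--   parts = []
--   for name, count in ememy_list:
--     if name == "Creeper":
--       snip = '<DrawEntity x="10" y="227" z="10" type="Creeper" yaw="0" xVel="1" yVel="1" zVel="1"/>'
--     else:
--       snip = '<DrawEntity x="10" y="227" z="10" type="{}" yaw="0" />'.format(name)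
--     parts.append(repeat(snip, count))
--   return "".join(parts)
-- ===== Notes on version B (the rewrite author's own statement) =====
-- stated objective: alternative
-- what changed: Each enemy's block is produced by exponentiation-by-squaring on the snippet string (O(log count) concatenations via bit tests and doubling) and the per-enemy blocks are collected into a list joined once, replacing A's nested per-instance accumulation loop.
import Mathlib
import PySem

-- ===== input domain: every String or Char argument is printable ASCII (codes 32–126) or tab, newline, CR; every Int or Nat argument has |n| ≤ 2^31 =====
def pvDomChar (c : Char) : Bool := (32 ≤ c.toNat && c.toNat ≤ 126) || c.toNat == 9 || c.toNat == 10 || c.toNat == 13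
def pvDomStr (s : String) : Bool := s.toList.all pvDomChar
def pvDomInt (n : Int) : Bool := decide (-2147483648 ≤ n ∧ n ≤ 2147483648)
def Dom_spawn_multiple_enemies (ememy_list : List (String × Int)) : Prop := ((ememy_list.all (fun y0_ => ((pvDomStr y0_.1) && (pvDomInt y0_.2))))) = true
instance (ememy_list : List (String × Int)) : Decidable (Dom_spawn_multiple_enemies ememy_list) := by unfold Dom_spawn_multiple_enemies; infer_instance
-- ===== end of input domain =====

-- B builds each enemy's block by exponentiation-by-squaring on strings (O(log n) concatenations
-- per enemy) collected into a parts list that is joined once, instead of A's nested per-instance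
-- accumulation loop (alternative algorithm; not measured faster).
-- ===== PORT A =====
def spawn_multiple_enemies (ememy_list : List (String × Int)) : String :=
  ememy_list.foldl (fun result_string e =>
    (PySem.List.pyRange 0 e.2 1).foldl (fun acc _ =>
      if e.1 == "Creeper" then
        acc ++ ("<DrawEntity x=\"10\" y=\"227\" z=\"10\" type=\"" ++ e.1 ++ "\" yaw=\"0\" xVel=\"1\" yVel=\"1\" zVel=\"1\"/>")
      else
        acc ++ ("<DrawEntity x=\"10\" y=\"227\" z=\"10\" type=\"" ++ e.1 ++ "\" yaw=\"0\" />")) result_string) ""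

-- ===== PORT B =====
-- binary-doubling repetition: Python's `while n > 0: if n & 1: out += piece; piece += piece; n >>= 1`
def pvRepeat (piece : String) (out : String) (n : Int) : String :=
  if _h : 0 < n then
    pvRepeat (piece ++ piece) (if n % 2 = 1 then out ++ piece else out) (n / 2)
  else out
termination_by n.toNat
decreasing_by omega

def spawn_multiple_enemies_alt (ememy_list : List (String × Int)) : String :=
  PySem.Str.join ""
    (ememy_list.foldl (fun parts e =>
      parts ++ [pvRepeat
        (if e.1 == "Creeper" then
          "<DrawEntity x=\"10\" y=\"227\" z=\"10\" type=\"Creeper\" yaw=\"0\" xVel=\"1\" yVel=\"1\" zVel=\"1\"/>"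
        else
          "<DrawEntity x=\"10\" y=\"227\" z=\"10\" type=\"" ++ e.1 ++ "\" yaw=\"0\" />") "" e.2]) [])

-- ===== PRECONDITION & SPEC =====
def Spec_spawn_multiple_enemies (ememy_list : List (String × Int)) (out : String) : Prop := out = spawn_multiple_enemies_alt ememy_list
instance (ememy_list : List (String × Int)) (out : String) : Decidable (Spec_spawn_multiple_enemies ememy_list out) := by unfold Spec_spawn_multiple_enemies; infer_instance

-- ===== CLAIM (what is proved, stated in full; the proofs are below) =====
def Claim_equal_spawn_multiple_enemies : Prop := ∀ (ememy_list : List (String × Int)), Dom_spawn_multiple_enemies ememy_list → Spec_spawn_multiple_enemies ememy_list (spawn_multiple_enemies ememy_list)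

-- ===== LEMMAS AND PROOFS =====
theorem intersperse_nil_flatten (xs : List (List Char)) : (List.intersperse [] xs).flatten = xs.flatten := by
  induction xs with
  | nil => simp
  | cons a t ih =>
    cases t with
    | nil => simp [List.intersperse]
    | cons b u =>
      simp only [List.intersperse, List.flatten] at *
      simpa using ih

theorem join_nil : PySem.Str.join "" [] = "" := by simp [PySem.Str.join, PySem.Chars.join, List.intercalate]
theorem join_cons (x : String) (xs : List String) : PySem.Str.join "" (x :: xs) = x ++ PySem.Str.join "" xs := by
  simp only [PySem.Str.join, PySem.Chars.join, List.map]
  have hnil : "".toList = ([] : List Char) := rfl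
  rw [List.intercalate, List.intercalate, hnil, intersperse_nil_flatten, intersperse_nil_flatten,
    List.flatten_cons]
  apply String.ext
  simp

-- n copies of s, concatenated (proof-side characterisation of repetition)
def pvRep (s : String) (n : Nat) : String := PySem.Str.join "" (List.replicate n s)

theorem pvRep_zero (s : String) : pvRep s 0 = "" := by simp [pvRep, join_nil]
theorem pvRep_succ (s : String) (n : Nat) : pvRep s (n + 1) = s ++ pvRep s n := by
  simp [pvRep, List.replicate, join_cons]

theorem pvRep_double (s : String) (k : Nat) : pvRep (s ++ s) k = pvRep s (2 * k) := by
  induction k with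
  | zero => simp [pvRep_zero]
  | succ m ih =>
    have : 2 * (m + 1) = (2 * m) + 1 + 1 := by ring
    rw [pvRep_succ, ih, this, pvRep_succ, pvRep_succ, String.append_assoc]

theorem pvRepeat_eq (n : Int) (piece out : String) :
    pvRepeat piece out n = out ++ pvRep piece n.toNat := by
  by_cases h : 0 < n
  · rw [pvRepeat]
    simp only [h, dif_pos]
    have ih := pvRepeat_eq (n / 2) (piece ++ piece) (if n % 2 = 1 then out ++ piece else out)
    rw [ih, pvRep_double]
    by_cases hm : n % 2 = 1
    · have hsplit : n.toNat = 2 * (n / 2).toNat + 1 := by omega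
      rw [if_pos hm, hsplit, pvRep_succ]
      simp [String.append_assoc]
    · have hsplit : n.toNat = 2 * (n / 2).toNat := by omega
      rw [if_neg hm, hsplit]
  · rw [pvRepeat]
    simp only [h, dif_neg, not_false_iff]
    have : n.toNat = 0 := by omega
    simp [this, pvRep_zero]
termination_by n.toNat
decreasing_by omega

theorem inner_fold (s : String) (L : List Int) (acc : String) :
    L.foldl (fun a _ => a ++ s) acc = acc ++ pvRep s L.length := by
  induction L generalizing acc with
  | nil => simp [pvRep_zero]
  | cons h t ih => simp [List.foldl, ih, pvRep_succ, String.append_assoc]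

-- B's parts-collecting fold is a map
theorem parts_fold (f : (String × Int) → String) (l : List (String × Int)) (acc : List String) :
    l.foldl (fun parts e => parts ++ [f e]) acc = acc ++ l.map f := by
  induction l generalizing acc with
  | nil => simp
  | cons e t ih => simp [List.foldl, ih]

theorem outer_fold (l : List (String × Int)) (acc : String) :
    l.foldl (fun result_string e =>
      (PySem.List.pyRange 0 e.2 1).foldl (fun a _ =>
        if e.1 == "Creeper" then
          a ++ ("<DrawEntity x=\"10\" y=\"227\" z=\"10\" type=\"" ++ e.1 ++ "\" yaw=\"0\" xVel=\"1\" yVel=\"1\" zVel=\"1\"/>")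
        else
          a ++ ("<DrawEntity x=\"10\" y=\"227\" z=\"10\" type=\"" ++ e.1 ++ "\" yaw=\"0\" />")) result_string) acc
    = acc ++ spawn_multiple_enemies_alt l := by
  induction l generalizing acc with
  | nil => simp [spawn_multiple_enemies_alt, join_nil]
  | cons e t ih =>
    simp only [List.foldl, ih, spawn_multiple_enemies_alt]
    rw [parts_fold, parts_fold]
    simp only [List.nil_append, List.map_cons]
    rw [pvRepeat_eq]
    by_cases h : e.1 == "Creeper"
    · have he : e.1 = "Creeper" := beq_iff_eq.mp h
      simp only [h, if_true]
      rw [inner_fold, PySem.List.length_pyRange_one]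
      simp only [List.singleton_append, join_cons, Int.sub_zero]
      simp [he, String.append_assoc]
    · simp only [h, Bool.false_eq_true, if_false]
      rw [inner_fold, PySem.List.length_pyRange_one]
      simp only [List.singleton_append, join_cons, Int.sub_zero]
      simp [String.append_assoc]

-- ===== VERDICT (by name: the statement is the Claim_ definition above) =====
theorem spawn_multiple_enemies_spec : Claim_equal_spawn_multiple_enemies := by
  intro l _
  unfold Spec_spawn_multiple_enemies spawn_multiple_enemies
  simpa using outer_fold l ""
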